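-- pv_equiv track=rewrite | github.com/ywcheong/solved-baekjoon | solve/2000+/2157.py | route_to_graph
-- ===== SOURCE A (Python) =====
-- INF = float("inf")
--
-- def route_to_graph(num_city, routes):
--     graph = dict()
--
--     for start_city, end_city, meal_score in routes:
--         if end_city <= start_city:
--             continue
--
--         # 가장 맛있는 기내식만 계산하자!
--         graph[start_city, end_city] = max(
--             graph.get((start_city, end_city), -INF), meal_score
--         )
--
--     return graph
-- ===== SOURCE B (Python) =====
-- def route_to_graph(num_city, routes):
--     valid = [route for route in routes if route[0] < route[1]]
--
--     # distinct keys in first-occurrence order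
--     keys = []
--     for start_city, end_city, _ in valid:
--         if (start_city, end_city) not in keys:
--             keys.append((start_city, end_city))
--
--     # per-key scan: the best meal over every flight on that exact route
--     return {
--         key: max(meal for start, end, meal in valid if (start, end) == key)
--         for key in keys
--     }
-- ===== Notes on version B (the rewrite author's own statement) =====
-- stated objective: alternative
-- what changed: Replaces A's single-pass running-max dict by a three-stage shape: filter valid routes, collect the distinct keys in first-occurrence order, then for each key do a fresh scan over all valid routes taking max of its scores (O(n*k) nested scans instead of one dict pass).
import Mathlib
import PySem

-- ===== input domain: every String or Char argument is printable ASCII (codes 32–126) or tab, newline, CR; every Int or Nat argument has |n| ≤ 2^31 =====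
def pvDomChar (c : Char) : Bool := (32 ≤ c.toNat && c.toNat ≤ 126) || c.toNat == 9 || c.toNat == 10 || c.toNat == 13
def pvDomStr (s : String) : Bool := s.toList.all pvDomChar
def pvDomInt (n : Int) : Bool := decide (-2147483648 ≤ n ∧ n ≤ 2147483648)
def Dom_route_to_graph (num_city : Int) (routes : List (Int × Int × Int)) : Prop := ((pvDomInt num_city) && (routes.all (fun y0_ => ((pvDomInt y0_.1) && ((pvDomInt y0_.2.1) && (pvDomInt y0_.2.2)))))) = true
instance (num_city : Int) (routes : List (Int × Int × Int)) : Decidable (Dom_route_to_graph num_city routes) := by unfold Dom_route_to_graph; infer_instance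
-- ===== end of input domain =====

-- B replaces A's single-pass running-max dict by three staged passes: filter the
-- valid routes, collect distinct keys in first-occurrence order, then per key a
-- fresh scan over all valid routes reduced with max; same results, different shape.


-- ===== PORT A =====
-- `graph.get(key, -INF)` followed by `max(…, meal_score)`: -INF is below every int,
-- so it is ported exactly as Option with `none` playing -INF (max(-INF, m) = m).
-- dict keyed by a pair, flattened to (start, end, value) triples per the type convention.
def route_to_graph (num_city : Int) (routes : List (Int × Int × Int)) : List (Int × Int × Int) :=
  (routes.foldl (fun graph r =>
      if r.2.1 ≤ r.1 then graph
      else graph.insert (r.1, r.2.1)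
        (match graph.get? (r.1, r.2.1) with
         | none => r.2.2
         | some v => max v r.2.2))
    PySem.Dict.empty).items.map (fun p => (p.1.1, p.1.2, p.2))

-- ===== PORT B =====
-- Python `max(generator)` on the per-key scores; the [] case is unreachable
-- (every key in `keys` has at least one route in `valid`).
def pymaxScores (l : List Int) : Int :=
  match l with
  | [] => 0
  | h :: t => t.foldl max h

def route_to_graph_alt (num_city : Int) (routes : List (Int × Int × Int)) : List (Int × Int × Int) :=
  let valid := routes.filter (fun r => decide (r.1 < r.2.1))
  let keys := valid.foldl (fun ks r =>
      if (r.1, r.2.1) ∈ ks then ks else ks ++ [(r.1, r.2.1)]) []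
  keys.map (fun k =>
    (k.1, k.2, pymaxScores ((valid.filter (fun r => (r.1, r.2.1) == k)).map (fun r => r.2.2))))

-- ===== PRECONDITION & SPEC =====
def Spec_route_to_graph (num_city : Int) (routes : List (Int × Int × Int)) (out : List (Int × Int × Int)) : Prop := out = route_to_graph_alt num_city routes
instance (num_city : Int) (routes : List (Int × Int × Int)) (out : List (Int × Int × Int)) : Decidable (Spec_route_to_graph num_city routes out) := by unfold Spec_route_to_graph; infer_instance

-- ===== CLAIM (what is proved, stated in full; the proofs are below) =====
def Claim_equal_route_to_graph : Prop := ∀ (num_city : Int) (routes : List (Int × Int × Int)), Dom_route_to_graph num_city routes → Spec_route_to_graph num_city routes (route_to_graph num_city routes)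

-- ===== LEMMAS AND PROOFS =====

-- abbreviations used only by the proofs
def afold (l : List (Int × Int × Int)) : PySem.Dict (Int × Int) Int :=
  l.foldl (fun graph r =>
      graph.insert (r.1, r.2.1)
        (match graph.get? (r.1, r.2.1) with
         | none => r.2.2
         | some v => max v r.2.2)) PySem.Dict.empty

def keysOf (l : List (Int × Int × Int)) : List (Int × Int) :=
  l.foldl (fun ks r => if (r.1, r.2.1) ∈ ks then ks else ks ++ [(r.1, r.2.1)]) []

def maxKey (l : List (Int × Int × Int)) (k : Int × Int) : Int :=
  pymaxScores ((l.filter (fun r => (r.1, r.2.1) == k)).map (fun r => r.2.2))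

-- a foldl that skips on p equals the foldl over the list with the p-elements filtered out
theorem foldl_skip {α β : Type} (p : β → Prop) [DecidablePred p] (f : α → β → α) (l : List β) (a : α) :
    l.foldl (fun s x => if p x then s else f s x) a
      = (l.filter (fun x => !decide (p x))).foldl f a := by
  induction l generalizing a with
  | nil => rfl
  | cons h t ih =>
    by_cases hp : p h <;> simp [List.foldl_cons, hp, ih]

theorem keysOf_append (l : List (Int × Int × Int)) (r : Int × Int × Int) :
    keysOf (l ++ [r]) = if (r.1, r.2.1) ∈ keysOf l then keysOf l
                        else keysOf l ++ [(r.1, r.2.1)] := by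
  simp [keysOf, List.foldl_append]

theorem mem_keysOf_iff (l : List (Int × Int × Int)) (k : Int × Int) :
    k ∈ keysOf l ↔ ∃ r ∈ l, (r.1, r.2.1) = k := by
  induction l using List.reverseRecOn with
  | nil => simp [keysOf]
  | append_singleton t r ih =>
    rw [keysOf_append]
    split_ifs with h
    · simp only [ih, List.mem_append, List.mem_singleton]
      constructor
      · rintro ⟨x, hx, rfl⟩; exact ⟨x, Or.inl hx, rfl⟩
      · rintro ⟨x, hx | rfl, rfl⟩
        · exact ⟨x, hx, rfl⟩
        · exact ih.1 h
    · simp only [List.mem_append, List.mem_singleton, ih]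
      constructor
      · rintro (⟨x, hx, rfl⟩ | rfl)
        · exact ⟨x, Or.inl hx, rfl⟩
        · exact ⟨r, Or.inr rfl, rfl⟩
      · rintro ⟨x, hx | rfl, rfl⟩
        · exact Or.inl ⟨x, hx, rfl⟩
        · exact Or.inr rfl

-- lookup in a dict whose items are a key list mapped through a value function
theorem get?_mk_keyfun (ks : List (Int × Int)) (f : (Int × Int) → Int) (k : Int × Int) :
    (PySem.Dict.mk (ks.map (fun k' => (k', f k')))).get? k
      = if k ∈ ks then some (f k) else none := by
  induction ks with
  | nil => simp [PySem.Dict.get?]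
  | cons h t ih =>
    simp only [List.map_cons, PySem.Dict.get?_mk_cons]
    by_cases hk : h == k
    · have : h = k := by exact eq_of_beq hk
      subst this; simp
    · have hne : h ≠ k := fun e => hk (by simp [e])
      simp [hk, ih, Ne.symm hne]

theorem maxKey_append_other (l : List (Int × Int × Int)) (r : Int × Int × Int)
    (k : Int × Int) (h : (r.1, r.2.1) ≠ k) :
    maxKey (l ++ [r]) k = maxKey l k := by
  simp [maxKey, List.filter_append, h]

theorem maxKey_append_self_of_mem (l : List (Int × Int × Int)) (r : Int × Int × Int)
    (hmem : (r.1, r.2.1) ∈ keysOf l) :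
    maxKey (l ++ [r]) (r.1, r.2.1) = max (maxKey l (r.1, r.2.1)) r.2.2 := by
  obtain ⟨x, hx, hxk⟩ := (mem_keysOf_iff l _).1 hmem
  have hfil : x ∈ l.filter (fun r' => (r'.1, r'.2.1) == (r.1, r.2.1)) :=
    List.mem_filter.2 ⟨hx, by simp [hxk]⟩
  simp only [maxKey, List.filter_append, List.map_append]
  have hself : (fun r' => (r'.1, r'.2.1) == (r.1, r.2.1)) r = true := by simp
  rw [List.filter_singleton]
  simp only [hself]
  cases hl : l.filter (fun r' => (r'.1, r'.2.1) == (r.1, r.2.1)) with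
  | nil => rw [hl] at hfil; simp at hfil
  | cons h0 t0 =>
    simp [pymaxScores, List.foldl_append]

theorem maxKey_append_self_of_not_mem (l : List (Int × Int × Int)) (r : Int × Int × Int)
    (hmem : (r.1, r.2.1) ∉ keysOf l) :
    maxKey (l ++ [r]) (r.1, r.2.1) = r.2.2 := by
  have hfil : l.filter (fun r' => (r'.1, r'.2.1) == (r.1, r.2.1)) = [] := by
    rw [List.filter_eq_nil_iff]
    intro x hx hbeq
    exact hmem ((mem_keysOf_iff l _).2 ⟨x, hx, by simpa using hbeq⟩)
  simp [maxKey, List.filter_append, hfil, pymaxScores]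

-- the invariant: A's dict items are exactly B's keys paired with B's per-key maxima
theorem afold_items (l : List (Int × Int × Int)) :
    (afold l).items = (keysOf l).map (fun k => (k, maxKey l k)) := by
  induction l using List.reverseRecOn with
  | nil => rfl
  | append_singleton t r ih =>
    have hdict : afold t = PySem.Dict.mk ((keysOf t).map (fun k => (k, maxKey t k))) := by
      rw [← ih]
    have hget : (afold t).get? (r.1, r.2.1)
        = if (r.1, r.2.1) ∈ keysOf t then some (maxKey t (r.1, r.2.1)) else none := by
      rw [hdict]; exact get?_mk_keyfun _ _ _
    have hstep : afold (t ++ [r])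
        = (afold t).insert (r.1, r.2.1)
            (match (afold t).get? (r.1, r.2.1) with
             | none => r.2.2
             | some v => max v r.2.2) := by
      simp [afold, List.foldl_append]
    rw [hstep, keysOf_append]
    by_cases hmem : (r.1, r.2.1) ∈ keysOf t
    · have hc : (afold t).contains (r.1, r.2.1) = true := by
        rw [PySem.Dict.contains_eq_isSome_get?, hget]; simp [hmem]
      rw [PySem.Dict.items_insert_of_contains _ _ hc, ih, hget, if_pos hmem,
        List.map_map]
      simp only [if_pos hmem]
      apply List.map_congr_left
      intro k hk
      simp only [Function.comp]
      by_cases hkk : k = (r.1, r.2.1)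
      · subst hkk
        simp [maxKey_append_self_of_mem t r hmem]
      · rw [maxKey_append_other t r k (Ne.symm hkk)]
        simp [hkk]
    · have hc : (afold t).contains (r.1, r.2.1) = false := by
        rw [PySem.Dict.contains_eq_isSome_get?, hget]; simp [hmem]
      rw [PySem.Dict.items_insert_of_not_contains _ _ hc, ih, hget, if_neg hmem,
        if_neg hmem, List.map_append]
      congr 1
      · apply List.map_congr_left
        intro k hk
        rw [maxKey_append_other t r k (fun e => hmem (e ▸ hk))]
      · simp [maxKey_append_self_of_not_mem t r hmem]

-- ===== VERDICT (by name: the statement is the Claim_ definition above) =====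
theorem route_to_graph_spec : Claim_equal_route_to_graph := by
  intro num_city routes _
  unfold Spec_route_to_graph route_to_graph route_to_graph_alt
  rw [foldl_skip (fun r : Int × Int × Int => r.2.1 ≤ r.1)]
  have hfil : routes.filter (fun x : Int × Int × Int => !decide (x.2.1 ≤ x.1))
      = routes.filter (fun r : Int × Int × Int => decide (r.1 < r.2.1)) := by
    apply List.filter_congr
    intro x _
    by_cases hlt : x.1 < x.2.1
    · have hn : ¬ x.2.1 ≤ x.1 := not_le.mpr hlt
      simp [hlt, hn]
    · have hle : x.2.1 ≤ x.1 := not_lt.1 hlt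
      simp [hlt, hle]
  rw [hfil]
  show (afold _).items.map _ = _
  rw [afold_items, List.map_map]
  rfl
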